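-- pv_equiv track=rewrite | github.com/knofler-rigor/Competitive-Programs | Task of Pairing.py | taskOfPairing
-- ===== SOURCE A (Python) =====
-- def taskOfPairing(freq):
--   count = 0
--   marker = False
--   for i in freq:
--     if i != 0:
--       count += i // 2
--       if i % 2 != 0 and marker:
--         count += 1
--         marker = False
--       elif i % 2 != 0:
--         marker = True
--     else:
--       marker = False
--   return count
-- ===== SOURCE B (Python) =====
-- def taskOfPairing(freq):
--   def block_pairs(block):
--     return sum(x // 2 for x in block) + sum(1 for x in block if x % 2 != 0) // 2
--   total = 0
--   block = []
--   for i in freq: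
--     if i == 0:
--       total += block_pairs(block)
--       block = []
--     else:
--       block.append(i)
--   return total + block_pairs(block)
-- ===== Notes on version B (the rewrite author's own statement) =====
-- stated objective: alternative
-- what changed: Replaces A's single pass with a boolean leftover marker by a group-then-reduce pass: split freq into zero-separated blocks of nonzero values, and for each block add sum(x//2) plus (count of odd entries)//2.
import Mathlib
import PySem

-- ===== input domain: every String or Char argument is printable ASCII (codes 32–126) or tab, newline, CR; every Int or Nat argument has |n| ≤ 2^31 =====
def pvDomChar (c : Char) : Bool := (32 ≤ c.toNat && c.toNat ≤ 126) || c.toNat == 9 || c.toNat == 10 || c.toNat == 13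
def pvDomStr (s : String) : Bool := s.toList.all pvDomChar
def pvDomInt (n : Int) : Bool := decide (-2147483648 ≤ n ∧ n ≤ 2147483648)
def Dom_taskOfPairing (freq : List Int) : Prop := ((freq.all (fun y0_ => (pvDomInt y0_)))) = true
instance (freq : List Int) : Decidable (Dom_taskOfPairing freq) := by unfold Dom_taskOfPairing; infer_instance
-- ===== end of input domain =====

-- B replaces A's single pass with a marker bit by a group-then-reduce pass over
-- zero-separated blocks (alternative decomposition, same cost; return value only).

-- ===== PORT A =====
-- one loop step of A: state = (count, marker); 'count += i // 2' inlined into each branch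
def stepA (s : Int × Bool) (i : Int) : Int × Bool :=
  if i ≠ 0 then
    if PySem.Int.mod i 2 ≠ 0 ∧ s.2 = true then (s.1 + PySem.Int.floordiv i 2 + 1, false)
    else if PySem.Int.mod i 2 ≠ 0 then (s.1 + PySem.Int.floordiv i 2, true)
    else (s.1 + PySem.Int.floordiv i 2, s.2)
  else (s.1, false)

def taskOfPairing (freq : List Int) : Int :=
  (freq.foldl stepA (0, false)).1

-- ===== PORT B =====
-- block_pairs: sum(x // 2 for x in block) + sum(1 for x in block if x % 2 != 0) // 2
def blockPairs (block : List Int) : Int :=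
  (block.foldl (fun a x => a + PySem.Int.floordiv x 2) 0) +
  PySem.Int.floordiv (block.foldl (fun a x => if PySem.Int.mod x 2 ≠ 0 then a + 1 else a) 0) 2

-- one loop step of B: state = (total, block)
def stepB (s : Int × List Int) (i : Int) : Int × List Int :=
  if i = 0 then (s.1 + blockPairs s.2, []) else (s.1, s.2 ++ [i])

def taskOfPairing_alt (freq : List Int) : Int :=
  let s := freq.foldl stepB ((0 : Int), ([] : List Int))
  s.1 + blockPairs s.2

-- ===== PRECONDITION & SPEC =====
def Spec_taskOfPairing (freq : List Int) (out : Int) : Prop := out = taskOfPairing_alt freq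
instance (freq : List Int) (out : Int) : Decidable (Spec_taskOfPairing freq out) := by unfold Spec_taskOfPairing; infer_instance

-- ===== CLAIM (what is proved, stated in full; the proofs are below) =====
def Claim_equal_taskOfPairing : Prop := ∀ (freq : List Int), Dom_taskOfPairing freq → Spec_taskOfPairing freq (taskOfPairing freq)

-- ===== LEMMAS AND PROOFS =====

-- sum of x // 2 over a block
def sdiv (b : List Int) : Int := b.foldl (fun a x => a + PySem.Int.floordiv x 2) 0
-- number of odd entries of a block
def oddsN (b : List Int) : Nat := b.countP (fun x => decide (PySem.Int.mod x 2 ≠ 0))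

lemma foldl_div_shift (b : List Int) : ∀ (c : Int),
    b.foldl (fun a x => a + PySem.Int.floordiv x 2) c = c + sdiv b := by
  induction b with
  | nil => intro c; simp [sdiv]
  | cons x t ih =>
    intro c
    simp only [List.foldl_cons]
    rw [ih]
    have hx : sdiv (x :: t) = PySem.Int.floordiv x 2 + sdiv t := by
      rw [sdiv, List.foldl_cons, ih, zero_add]
    rw [hx]
    ring

lemma foldl_odd_shift (b : List Int) : ∀ (c : Int),
    b.foldl (fun a x => if PySem.Int.mod x 2 ≠ 0 then a + 1 else a) c = c + (oddsN b : Int) := by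
  induction b with
  | nil => intro c; simp [oddsN]
  | cons x t ih =>
    intro c
    simp only [List.foldl_cons]
    rw [ih]
    simp only [oddsN, List.countP_cons]
    by_cases h : x % 2 = 1
    · simp [h]
      ring
    · simp [h]

lemma blockPairs_eq (b : List Int) : blockPairs b = sdiv b + ((oddsN b / 2 : Nat) : Int) := by
  have h2 : (2 : Int) = ((2 : Nat) : Int) := rfl
  rw [blockPairs, foldl_div_shift, foldl_odd_shift, zero_add, zero_add, h2,
    PySem.Int.floordiv_natCast]

lemma sdiv_append (b : List Int) (i : Int) :
    sdiv (b ++ [i]) = sdiv b + PySem.Int.floordiv i 2 := by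
  rw [sdiv, List.foldl_append, List.foldl_cons, List.foldl_nil, foldl_div_shift b 0, zero_add]

lemma oddsN_append (b : List Int) (i : Int) :
    oddsN (b ++ [i]) = oddsN b + (if PySem.Int.mod i 2 ≠ 0 then 1 else 0) := by
  simp only [oddsN, List.countP_append, List.countP_cons, List.countP_nil]
  by_cases h : PySem.Int.mod i 2 ≠ 0 <;> simp [h]

lemma stepA_eq (c : Int) (b : List Int) (i : Int) (hi : i ≠ 0) :
    stepA (c + blockPairs b, decide (oddsN b % 2 = 1)) i
      = (c + blockPairs (b ++ [i]), decide (oddsN (b ++ [i]) % 2 = 1)) := by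
  rw [stepA, if_pos hi]
  by_cases ho : PySem.Int.mod i 2 ≠ 0
  · by_cases hm : oddsN b % 2 = 1
    · rw [if_pos ⟨ho, by simp [hm]⟩]
      simp only [Prod.mk.injEq, blockPairs_eq, sdiv_append, oddsN_append, if_pos ho]
      refine ⟨?_, ?_⟩
      · have h1 : (oddsN b + 1) / 2 = oddsN b / 2 + 1 := by omega
        rw [h1]; push_cast; ring
      · have h1 : (oddsN b + 1) % 2 = 0 := by omega
        simp [h1]
    · rw [if_neg (by simp [hm]), if_pos ho]
      simp only [Prod.mk.injEq, blockPairs_eq, sdiv_append, oddsN_append, if_pos ho]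
      refine ⟨?_, ?_⟩
      · have h1 : (oddsN b + 1) / 2 = oddsN b / 2 := by omega
        rw [h1]; push_cast; ring
      · have h1 : (oddsN b + 1) % 2 = 1 := by omega
        simp [h1]
  · rw [if_neg (fun h => ho h.1), if_neg ho]
    simp only [Prod.mk.injEq, blockPairs_eq, sdiv_append, oddsN_append, if_neg ho]
    refine ⟨by push_cast; ring, by simp⟩

lemma main_inv (l : List Int) : ∀ (c : Int) (b : List Int),
    (l.foldl stepA (c + blockPairs b, decide (oddsN b % 2 = 1))).1
      = (l.foldl stepB (c, b)).1 + blockPairs ((l.foldl stepB (c, b)).2) := by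
  induction l with
  | nil => intro c b; simp
  | cons i t ih =>
    intro c b
    simp only [List.foldl_cons]
    by_cases hi : i = 0
    · subst hi
      have hA : stepA (c + blockPairs b, decide (oddsN b % 2 = 1)) 0
          = ((c + blockPairs b) + blockPairs ([] : List Int),
              decide (oddsN ([] : List Int) % 2 = 1)) := by
        have hbp : blockPairs ([] : List Int) = 0 := by decide
        rw [stepA, if_neg (by simp), hbp]
        simp [oddsN]
      have hB : stepB (c, b) 0 = (c + blockPairs b, []) := by simp [stepB]
      rw [hA, hB]
      exact ih (c + blockPairs b) []
    · have hB : stepB (c, b) i = (c, b ++ [i]) := by simp [stepB, hi]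
      rw [hB, stepA_eq c b i hi]
      exact ih c (b ++ [i])

-- ===== VERDICT (by name: the statement is the Claim_ definition above) =====
theorem taskOfPairing_spec : Claim_equal_taskOfPairing := by
  intro freq _
  show taskOfPairing freq = taskOfPairing_alt freq
  have hbp : blockPairs ([] : List Int) = 0 := by decide
  have h := main_inv freq 0 []
  rw [hbp] at h
  simpa [taskOfPairing, taskOfPairing_alt, oddsN] using h
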